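-- pv_equiv track=rewrite | github.com/iriscxy/Unified-Timeline-Summarizer | bleu/calculatebleu.py | biGram
-- ===== SOURCE A (Python) =====
-- def biGramDictionary(sentence):
--     dictionary = {}
--     for i in range(0, len(sentence)):
--
--         if i == len(sentence) - 1:
--             break
--         else:
--             bigram = sentence[i] + " " + sentence[i + 1]
--             if bigram in dictionary:
--                 dictionary[bigram] += 1
--             else:
--                 dictionary[bigram] = 1
--     return dictionary
--
-- def biGram(candidateSentence, referenceSentences):
--     referenceDict = []
--     candidateSentence = candidateSentence.lower().split()
--     candidateSentence = list(filter(lambda x: x is not None, candidateSentence))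
--     candidateDict = biGramDictionary(candidateSentence)
--     count = 0
--     for line in referenceSentences:
--         line = line.lower().split()
--         line = list(filter(lambda x: x is not None, line))
--         referenceDict.append(biGramDictionary(line))
--     for word in candidateDict:
--         maxRefIndex = 0
--         for index2 in range(0, len(referenceDict)):
--             if word in referenceDict[index2]:
--                 maxRefIndex = max(maxRefIndex, referenceDict[index2][word])
--         count += min(candidateDict[word], maxRefIndex)
--     sumngram = 0
--     for values in candidateDict.values():
--         sumngram += values
--     return count, sumngram
-- ===== SOURCE B (Python) =====
-- def biGram(candidateSentence, referenceSentences):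
--     cwords = candidateSentence.lower().split()
--     cand = {}
--     for a, b in zip(cwords, cwords[1:]):
--         key = a + " " + b
--         cand[key] = cand.get(key, 0) + 1
--     # one dict holding, for each bigram, its maximum count over all references
--     best = {}
--     for line in referenceSentences:
--         rwords = line.lower().split()
--         seen = {}
--         for a, b in zip(rwords, rwords[1:]):
--             key = a + " " + b
--             seen[key] = seen.get(key, 0) + 1
--         for key, c in seen.items():
--             if c > best.get(key, 0):
--                 best[key] = c
--     count = sum(min(c, best.get(key, 0)) for key, c in cand.items())
--     return count, sum(cand.values())
-- ===== Notes on version B (the rewrite author's own statement) =====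
-- stated objective: faster
-- what changed: B counts candidate bigrams from adjacent-pair zips and precomputes one dict of per-bigram maximum counts over all references, so each candidate bigram is matched by a single O(1) lookup instead of A's scan over every reference dict.
import Mathlib
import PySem

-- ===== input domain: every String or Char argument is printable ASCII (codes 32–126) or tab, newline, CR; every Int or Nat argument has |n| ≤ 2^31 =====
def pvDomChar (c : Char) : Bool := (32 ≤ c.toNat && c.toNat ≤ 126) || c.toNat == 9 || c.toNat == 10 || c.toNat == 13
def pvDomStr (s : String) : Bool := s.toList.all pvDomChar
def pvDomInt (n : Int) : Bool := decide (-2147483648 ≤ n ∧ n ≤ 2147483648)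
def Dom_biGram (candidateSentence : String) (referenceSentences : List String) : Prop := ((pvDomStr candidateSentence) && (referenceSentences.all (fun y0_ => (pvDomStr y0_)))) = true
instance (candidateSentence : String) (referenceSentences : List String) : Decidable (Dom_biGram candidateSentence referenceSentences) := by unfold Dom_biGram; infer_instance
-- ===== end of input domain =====

-- B replaces A's per-candidate-bigram scan over all reference dicts by one precomputed
-- dict of per-bigram maximum reference counts (objective: faster, asymptotic).

-- ===== PORT A =====
-- the index loop of biGramDictionary, with Python's 'break' at i == len(sentence)-1
def pvBgdLoop (sentence : List String) (is_ : List Int) (d : PySem.Dict String Int) : PySem.Dict String Int :=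
  match is_ with
  | [] => d
  | i :: rest =>
    if i = PySem.List.len sentence - 1 then d  -- break
    else
      -- sentence[i], sentence[i+1]: i ranges over range(0, len) and stops before len-1, so in range
      let bigram := (PySem.List.pyGet? sentence i).getD "" ++ " " ++ (PySem.List.pyGet? sentence (i + 1)).getD ""
      let d' := if d.contains bigram then d.modify bigram 0 (· + 1) else d.insert bigram 1
      pvBgdLoop sentence rest d'

def biGramDictionary (sentence : List String) : PySem.Dict String Int :=
  pvBgdLoop sentence (PySem.List.pyRange 0 (PySem.List.len sentence)) PySem.Dict.empty

def biGram (candidateSentence : String) (referenceSentences : List String) : Int × Int :=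
  -- filter(lambda x: x is not None, …) never drops a string: ported as a filter by the constantly-true predicate
  let cand := (PySem.Str.split₀ (PySem.Str.lower candidateSentence)).filter (fun _ => true)
  let candidateDict := biGramDictionary cand
  let referenceDict := referenceSentences.foldl
    (fun acc line => acc ++ [biGramDictionary ((PySem.Str.split₀ (PySem.Str.lower line)).filter (fun _ => true))]) []
  let count := candidateDict.keys.foldl
    (fun count word =>
      let maxRefIndex := (PySem.List.pyRange 0 (PySem.List.len referenceDict)).foldl
        (fun m index2 =>
          -- referenceDict[index2]: index2 in range(0, len(referenceDict)), so in range
          let rd := PySem.List.pyGetD referenceDict index2 PySem.Dict.empty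
          if rd.contains word then max m (rd.getD word 0) else m) 0
      -- candidateDict[word]: word is a key of candidateDict, so present
      count + min (candidateDict.getD word 0) maxRefIndex) 0
  let sumngram := candidateDict.values.foldl (fun s v => s + v) 0
  (count, sumngram)

-- ===== PORT B =====
-- zip(words, words[1:]) joined with a space
def pvBigrams (words : List String) : List String :=
  (words.zip (PySem.List.slice words (some 1) none)).map (fun p => p.1 ++ " " ++ p.2)

-- cand[key] = cand.get(key, 0) + 1 over the bigram list
def pvCountDict (words : List String) : PySem.Dict String Int :=
  (pvBigrams words).foldl (fun d k => d.insert k (d.getD k 0 + 1)) PySem.Dict.empty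

-- for key, c in seen.items(): if c > best.get(key, 0): best[key] = c
def pvMerge (best seen : PySem.Dict String Int) : PySem.Dict String Int :=
  seen.items.foldl (fun b p => if b.getD p.1 0 < p.2 then b.insert p.1 p.2 else b) best

def biGram_alt (candidateSentence : String) (referenceSentences : List String) : Int × Int :=
  let cwords := PySem.Str.split₀ (PySem.Str.lower candidateSentence)
  let cand := pvCountDict cwords
  let best := referenceSentences.foldl
    (fun b line => pvMerge b (pvCountDict (PySem.Str.split₀ (PySem.Str.lower line)))) PySem.Dict.empty
  let count := (cand.items.map (fun p => min p.2 (best.getD p.1 0))).sum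
  (count, cand.values.sum)

-- ===== PRECONDITION & SPEC =====
def Spec_biGram (candidateSentence : String) (referenceSentences : List String) (out : Int × Int) : Prop := out = biGram_alt candidateSentence referenceSentences
instance (candidateSentence : String) (referenceSentences : List String) (out : Int × Int) : Decidable (Spec_biGram candidateSentence referenceSentences out) := by unfold Spec_biGram; infer_instance

-- ===== CLAIM (what is proved, stated in full; the proofs are below) =====
def Claim_equal_biGram : Prop := ∀ (candidateSentence : String) (referenceSentences : List String), Dom_biGram candidateSentence referenceSentences → Spec_biGram candidateSentence referenceSentences (biGram candidateSentence referenceSentences)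

-- ===== LEMMAS AND PROOFS =====

-- the counter each reference line contributes
def pvCntOf (line : String) : PySem.Dict String Int :=
  PySem.Dict.counter (pvBigrams (PySem.Str.split₀ (PySem.Str.lower line)))

lemma pvBigrams_single (a : String) : pvBigrams [a] = [] := by
  simp [pvBigrams, PySem.List.slice_from (xs := [a]) (a := 1) (by norm_num)]

lemma pvBigrams_cons_cons (a b : String) (r : List String) :
    pvBigrams (a :: b :: r) = (a ++ " " ++ b) :: pvBigrams (b :: r) := by
  unfold pvBigrams
  rw [PySem.List.slice_from (xs := a :: b :: r) (a := 1) (by norm_num),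
      PySem.List.slice_from (xs := b :: r) (a := 1) (by norm_num)]
  simp

lemma getD_zero_of_not_contains (d : PySem.Dict String Int) (k : String)
    (h : d.contains k = false) : d.getD k 0 = 0 := by
  unfold PySem.Dict.getD PySem.Dict.get?
  rw [List.find?_eq_none.2 ?_]
  · rfl
  · intro p hp
    unfold PySem.Dict.contains at h
    rw [List.any_eq_false] at h
    exact h p hp

lemma pvStep_modify (d : PySem.Dict String Int) (k : String) :
    (if d.contains k then d.modify k 0 (· + 1) else d.insert k 1) = d.modify k 0 (· + 1) := by
  by_cases h : d.contains k = true
  · simp [h]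
  · have h' : d.contains k = false := by simpa using h
    rw [h']
    simp [PySem.Dict.modify, getD_zero_of_not_contains d k h']

lemma pvBgdLoop_eq (s : List String) :
    ∀ (fuel i : Nat) (d : PySem.Dict String Int), s.length - i ≤ fuel →
      pvBgdLoop s (PySem.List.pyRange (i : Int) (PySem.List.len s)) d
        = (pvBigrams (s.drop i)).foldl (fun d k => d.modify k 0 (· + 1)) d := by
  intro fuel
  induction fuel with
  | zero =>
    intro i d h
    have hge : s.length ≤ i := by omega
    rw [PySem.List.pyRange_one_eq_nil (by simp [PySem.List.len]; exact_mod_cast hge),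
        List.drop_eq_nil_of_le hge]
    rfl
  | succ n ih =>
    intro i d h
    by_cases hlt : i < s.length
    swap
    · have hge : s.length ≤ i := by omega
      rw [PySem.List.pyRange_one_eq_nil (by simp [PySem.List.len]; exact_mod_cast hge),
          List.drop_eq_nil_of_le hge]
      rfl
    · rw [PySem.List.pyRange_one_cons (by simp [PySem.List.len]; exact_mod_cast hlt)]
      show pvBgdLoop s ((i : Int) :: PySem.List.pyRange ((i : Int) + 1) (PySem.List.len s)) d = _
      by_cases hlast : (i : Int) = PySem.List.len s - 1
      · have hi : i = s.length - 1 := by simp [PySem.List.len] at hlast; omega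
        rw [pvBgdLoop, if_pos hlast]
        have hdrop : (s.drop i).length = 1 := by simp [hi]; omega
        obtain ⟨a, ha⟩ := List.length_eq_one_iff.mp hdrop
        rw [ha, pvBigrams_single]
        rfl
      · have hi1 : i + 1 < s.length := by
          simp [PySem.List.len] at hlast; omega
        rw [pvBgdLoop, if_neg hlast]
        have hget0 : PySem.List.pyGet? s (i : Int) = some s[i] := by
          simp [PySem.List.pyGet?, PySem.List.pyIdx?, hlt]
        have hget1 : PySem.List.pyGet? s ((i : Int) + 1) = some s[i+1] := by
          simp only [PySem.List.pyGet?, PySem.List.pyIdx?]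
          rw [if_pos (by positivity), if_pos (by exact_mod_cast hi1)]
          have : ((i : Int) + 1).toNat = i + 1 := by omega
          simp [this, List.getElem?_eq_getElem hi1]
        simp only [hget0, hget1, Option.getD_some]
        rw [pvStep_modify]
        rw [List.drop_eq_getElem_cons hlt, List.drop_eq_getElem_cons hi1, pvBigrams_cons_cons]
        rw [List.foldl_cons]
        rw [← List.drop_eq_getElem_cons hi1]
        have : ((i : Int) + 1) = ((i + 1 : Nat) : Int) := by push_cast; ring
        rw [this, ih (i + 1) _ (by omega)]


lemma biGramDictionary_eq (s : List String) :
    biGramDictionary s = PySem.Dict.counter (pvBigrams s) := by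
  unfold biGramDictionary
  have := pvBgdLoop_eq s s.length 0 PySem.Dict.empty (by omega)
  simpa [PySem.Dict.counter] using this

lemma pvCountDict_eq (w : List String) :
    pvCountDict w = PySem.Dict.counter (pvBigrams w) :=
  PySem.Dict.foldl_insert_getD_add_one_eq_counter _

lemma pvMerge_items (k : String) :
    ∀ (ks : List String) (c : String → Int) (b : PySem.Dict String Int), ks.Nodup →
      0 ≤ b.getD k 0 → (∀ j, 0 ≤ c j) →
      ((ks.map (fun j => (j, c j))).foldl
          (fun b p => if b.getD p.1 0 < p.2 then b.insert p.1 p.2 else b) b).getD k 0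
        = if k ∈ ks then max (b.getD k 0) (c k) else b.getD k 0 := by
  intro ks
  induction ks with
  | nil => intro c b _ _ _; simp
  | cons j tl ih =>
    intro c b hnd hb hc
    obtain ⟨hj, htl⟩ := List.nodup_cons.mp hnd
    simp only [List.map_cons, List.foldl_cons]
    set b' := if b.getD j 0 < c j then b.insert j (c j) else b with hb'
    have hgetj : b'.getD j 0 = max (b.getD j 0) (c j) := by
      rw [hb']
      split_ifs with hlt
      · rw [PySem.Dict.getD_insert]; simp; omega
      · omega
    have hgetne : ∀ k', k' ≠ j → b'.getD k' 0 = b.getD k' 0 := by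
      intro k' hne
      rw [hb']
      split_ifs
      · rw [PySem.Dict.getD_insert]; simp [hne]
      · rfl
    by_cases hkj : k = j
    · subst hkj
      rw [ih c b' htl (by rw [hgetj]; omega) hc]
      simp [hj, hgetj]
    · rw [ih c b' htl (by rw [hgetne k hkj]; omega) hc, hgetne k hkj]
      simp [hkj]


lemma pvMerge_getD (l : List String) (b : PySem.Dict String Int) (k : String)
    (hb : 0 ≤ b.getD k 0) :
    (pvMerge b (PySem.Dict.counter l)).getD k 0
      = max (b.getD k 0) ((PySem.Dict.counter l).getD k 0) := by
  unfold pvMerge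
  rw [PySem.Dict.items_counter,
      pvMerge_items k (PySem.Set.ofList l) (fun j => ((l.count j : Nat) : Int)) b
        (PySem.Set.nodup_ofList l) hb (fun j => by positivity),
      PySem.Dict.getD_counter]
  by_cases hm : k ∈ l
  · simp [(PySem.Set.mem_ofList l k).mpr hm]
  · rw [if_neg (fun hc => hm ((PySem.Set.mem_ofList l k).mp hc))]
    rw [List.count_eq_zero.mpr hm]
    simp
    omega

lemma pvBest_eq (k : String) :
    ∀ (refs : List String) (b : PySem.Dict String Int), 0 ≤ b.getD k 0 →
      (refs.foldl (fun b line => pvMerge b (pvCountDict (PySem.Str.split₀ (PySem.Str.lower line)))) b).getD k 0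
        = refs.foldl (fun m line => max m ((pvCntOf line).getD k 0)) (b.getD k 0) := by
  intro refs
  induction refs with
  | nil => intro b _; rfl
  | cons line tl ih =>
    intro b hb
    simp only [List.foldl_cons]
    rw [pvCountDict_eq]
    rw [ih _ (by rw [pvMerge_getD _ _ _ hb]; have := (PySem.Dict.getD_counter (pvBigrams (PySem.Str.split₀ (PySem.Str.lower line))) k); omega)]
    rw [pvMerge_getD _ _ _ hb]
    rfl

lemma pvMaxRef_eq (k : String) :
    ∀ (refs : List String) (m : Int), 0 ≤ m →
      (refs.map pvCntOf).foldl
          (fun m rd => if rd.contains k then max m (rd.getD k 0) else m) m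
        = refs.foldl (fun m line => max m ((pvCntOf line).getD k 0)) m := by
  intro refs
  induction refs with
  | nil => intro m _; rfl
  | cons line tl ih =>
    intro m hm
    simp only [List.map_cons, List.foldl_cons]
    by_cases hc : (pvCntOf line).contains k = true
    · rw [if_pos hc, ih _ (by have := PySem.Dict.getD_counter (pvBigrams (PySem.Str.split₀ (PySem.Str.lower line))) k; unfold pvCntOf; omega)]
    · have hc' : (pvCntOf line).contains k = false := by simpa using hc
      have hnm : k ∉ pvBigrams (PySem.Str.split₀ (PySem.Str.lower line)) := by
        unfold pvCntOf at hc'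
        rw [PySem.Dict.contains_counter] at hc'
        simpa using hc'
      have hz : (pvCntOf line).getD k 0 = 0 := by
        unfold pvCntOf
        rw [PySem.Dict.getD_counter, List.count_eq_zero.mpr hnm]
        rfl
      rw [hc', if_neg (by simp), hz, max_eq_left hm, ih _ hm]

lemma pvCount_eq (CB : List String) (M : String → Int) :
    (PySem.Dict.counter CB).keys.foldl
        (fun cnt w => cnt + min ((PySem.Dict.counter CB).getD w 0) (M w)) 0
      = ((PySem.Dict.counter CB).items.map (fun p => min p.2 (M p.1))).sum := by
  rw [PySem.Dict.keys_counter, PySem.Dict.items_counter, List.map_map,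
      PySem.List.foldl_add (PySem.Set.ofList CB)
        (fun w => min ((PySem.Dict.counter CB).getD w 0) (M w)) 0]
  simp [Function.comp_def, PySem.Dict.getD_counter]

-- ===== VERDICT (by name: the statement is the Claim_ definition above) =====
set_option maxHeartbeats 1000000 in
theorem biGram_spec : Claim_equal_biGram := by
  intro c refs _
  unfold Spec_biGram biGram biGram_alt
  simp only [List.filter_true, biGramDictionary_eq]
  have h3 : refs.foldl (fun acc line => acc ++ [PySem.Dict.counter (pvBigrams (PySem.Str.split₀ (PySem.Str.lower line)))]) [] = refs.map pvCntOf := by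
    show List.foldl (fun acc line => acc ++ [pvCntOf line]) [] refs = _
    rw [PySem.List.foldl_append_singleton_eq_map (f := pvCntOf) refs []]
    rfl
  simp only [h3]
  have hempty : ∀ w : String, (PySem.Dict.empty : PySem.Dict String Int).getD w 0 = 0 := fun w => rfl
  have h5 : ∀ w : String,
      List.foldl (fun m index2 =>
          if (PySem.List.pyGetD (List.map pvCntOf refs) index2 PySem.Dict.empty).contains w = true then
            max m ((PySem.List.pyGetD (List.map pvCntOf refs) index2 PySem.Dict.empty).getD w 0)
          else m) 0 (PySem.List.pyRange 0 (PySem.List.len (List.map pvCntOf refs)))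
        = refs.foldl (fun m line => max m ((pvCntOf line).getD w 0)) 0 := by
    intro w
    rw [PySem.List.foldl_pyRange_pyGetD (List.map pvCntOf refs) PySem.Dict.empty
        (fun m rd => if rd.contains w = true then max m (rd.getD w 0) else m) 0 le_rfl]
    simp only [Int.toNat_zero, List.drop_zero]
    exact pvMaxRef_eq w refs 0 le_rfl
  have h4 : ∀ w : String,
      (refs.foldl (fun b line => pvMerge b (pvCountDict (PySem.Str.split₀ (PySem.Str.lower line))))
          PySem.Dict.empty).getD w 0
        = refs.foldl (fun m line => max m ((pvCntOf line).getD w 0)) 0 := by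
    intro w
    have := pvBest_eq w refs PySem.Dict.empty (by rw [hempty])
    rwa [hempty] at this
  simp only [h5]
  simp only [h4]
  simp only [pvCountDict_eq]
  simp only [Prod.mk.injEq]
  constructor
  · exact pvCount_eq (pvBigrams (PySem.Str.split₀ (PySem.Str.lower c)))
      (fun w => refs.foldl (fun m line => max m ((pvCntOf line).getD w 0)) 0)
  · rw [PySem.List.foldl_add ((PySem.Dict.counter (pvBigrams (PySem.Str.split₀ (PySem.Str.lower c)))).values) (fun x => x) 0]
    simp
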